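-- pv_equiv track=rewrite | github.com/shivanshthakr/final_project | run.py | sort_sentences
-- ===== SOURCE A (Python) =====
-- def sort_sentences (original, output):
-- 	sorted_sent_arr = []
-- 	sorted_output = []
-- 	for i in range(0, len(output)):
-- 		if(output[i] in original):
-- 			sorted_sent_arr.append(original.index(output[i]))
-- 	sorted_sent_arr = sorted(sorted_sent_arr)
--
-- 	for i in range(0, len(sorted_sent_arr)):
-- 		sorted_output.append(str(original[sorted_sent_arr[i]]))
-- 	return sorted_output
-- ===== SOURCE B (Python) =====
-- def sort_sentences(original, output):
--     res = []
--     for i, item in enumerate(original):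
--         if original.index(item) == i:
--             res += [str(item)] * output.count(item)
--     return res
-- ===== Notes on version B (the rewrite author's own statement) =====
-- stated objective: alternative
-- what changed: Instead of collecting a first-occurrence index for every output element and sorting that index list, B makes one pass over enumerate(original) in its already-sorted index order, emitting each first occurrence output.count(item) times, so the sort disappears.
import Mathlib
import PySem

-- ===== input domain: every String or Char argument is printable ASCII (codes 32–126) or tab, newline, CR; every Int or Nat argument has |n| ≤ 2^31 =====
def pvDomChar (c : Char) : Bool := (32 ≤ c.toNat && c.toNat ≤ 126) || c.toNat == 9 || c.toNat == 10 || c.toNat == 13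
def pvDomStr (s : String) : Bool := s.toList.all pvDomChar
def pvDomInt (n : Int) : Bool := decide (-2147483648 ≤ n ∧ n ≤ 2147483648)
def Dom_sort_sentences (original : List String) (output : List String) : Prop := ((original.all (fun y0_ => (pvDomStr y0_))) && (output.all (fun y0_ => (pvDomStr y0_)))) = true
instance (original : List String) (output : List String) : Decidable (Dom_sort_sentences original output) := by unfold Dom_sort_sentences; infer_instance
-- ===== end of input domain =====

-- B re-decomposes A: instead of collecting first-occurrence indices from output and sorting them,
-- it walks original in its natural (already sorted) index order and emits each first occurrence
-- output.count(item) times — same value, no sort. (objective: alternative)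

-- ===== PORT A =====
-- literal port of A; `str(original[j])` on a string is the identity; original[j] with j a valid
-- first-occurrence index is ported as getD (j is always in range there)
def sort_sentences (original : List String) (output : List String) : List String :=
  -- for i in range(0,len(output)): if output[i] in original: append(original.index(output[i]))
  let sorted_sent_arr : List Nat :=
    output.foldl (fun acc x =>
      if x ∈ original then acc ++ [(PySem.List.index? original x).getD 0] else acc) []
  -- sorted_sent_arr = sorted(sorted_sent_arr)
  let sorted_arr := PySem.List.sorted sorted_sent_arr (fun i => i) false
  -- for i in range(0,len(...)): sorted_output.append(str(original[...]))
  sorted_arr.foldl (fun acc j => acc ++ [original.getD j ""]) []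

-- ===== PORT B =====
-- literal port of Source B; `original.index(item) == i` is exact as `index? = some i` since item is
-- drawn from original (index never raises); `[str(item)] * count` is replicate
def sort_sentences_alt (original : List String) (output : List String) : List String :=
  (PySem.List.enumerate original).foldl (fun acc p =>
    if PySem.List.index? original p.2 = some p.1.toNat then
      acc ++ List.replicate (PySem.List.count output p.2) p.2
    else acc) []

-- ===== PRECONDITION & SPEC =====
def Spec_sort_sentences (original : List String) (output : List String) (out : List String) : Prop := out = sort_sentences_alt original output
instance (original : List String) (output : List String) (out : List String) : Decidable (Spec_sort_sentences original output out) := by unfold Spec_sort_sentences; infer_instance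

-- ===== CLAIM (what is proved, stated in full; the proofs are below) =====
def Claim_equal_sort_sentences : Prop := ∀ (original : List String) (output : List String), Dom_sort_sentences original output → Spec_sort_sentences original output (sort_sentences original output)

-- ===== LEMMAS AND PROOFS =====

-- helper: the block of output values B emits at position p of enumerate original
def pvBlockB (original output : List String) (p : Int × String) : List String :=
  if PySem.List.index? original p.2 = some p.1.toNat then
    List.replicate (PySem.List.count output p.2) p.2
  else []

-- helper: same block, as indices (the canonical sorted index list)
def pvBlockI (original output : List String) (p : Int × String) : List Nat :=
  if PySem.List.index? original p.2 = some p.1.toNat then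
    List.replicate (PySem.List.count output p.2) p.1.toNat
  else []

def pvIdxList (original output : List String) : List Nat :=
  (PySem.List.enumerate original).flatMap (pvBlockI original output)

-- B's fold is the flatMap of its blocks
theorem alt_eq_flatMap (original output : List String) :
    sort_sentences_alt original output
      = (PySem.List.enumerate original).flatMap (pvBlockB original output) := by
  unfold sort_sentences_alt
  have h : (fun (acc : List String) (p : Int × String) =>
      if PySem.List.index? original p.2 = some p.1.toNat then
        acc ++ List.replicate (PySem.List.count output p.2) p.2
      else acc)
      = (fun acc p => acc ++ pvBlockB original output p) := by
    funext acc p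
    unfold pvBlockB
    split_ifs <;> simp
  rw [h, PySem.List.foldl_append_eq_flatMap]
  simp

theorem count_flatMap' {α β : Type} [BEq β] (l : List α) (g : α → List β) (b : β) :
    (l.flatMap g).count b = (l.map (fun a => (g a).count b)).sum := by
  induction l with
  | nil => simp
  | cons x xs ih => simp [List.count_append, ih]

theorem sum_map_single {α : Type} [DecidableEq α] [BEq α] [LawfulBEq α] (l : List α) (a : α) (c : Nat)
    (t : α → Nat) (h : ∀ p ∈ l, t p = if p = a then c else 0) :
    (l.map t).sum = c * l.count a := by
  induction l with
  | nil => simp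
  | cons x xs ih =>
    have hx := h x (by simp)
    simp only [List.map_cons, List.sum_cons, List.count_cons]
    rw [ih (fun p hp => h p (by simp [hp])), hx]
    by_cases hxa : x = a <;> simp [hxa, Nat.mul_add, Nat.add_comm]

theorem count_enumerate_pair (original : List String) (j : Nat) (hj : j < original.length) :
    (PySem.List.enumerate original).count ((j : Int), original.getD j "") = 1 := by
  have hmem : ((j : Int), original.getD j "") ∈ PySem.List.enumerate original := by
    rw [PySem.List.mem_enumerate_iff]
    exact ⟨j, hj, by simp [List.getElem?_eq_getElem hj]⟩
  have hnd : (PySem.List.enumerate original).Nodup := by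
    have := PySem.List.pairwise_lt_enumerate (xs := original) (s := 0)
    exact this.imp (fun h => by intro he; rw [he] at h; exact lt_irrefl _ h)
  exact List.count_eq_one_of_mem hnd hmem

-- first-occurrence condition: j is the first index at which original[j] occurs
abbrev pvFO (original : List String) (j : Nat) : Prop :=
  PySem.List.index? original (original.getD j "") = some j

theorem countC (original output : List String) (j : Nat) :
    (pvIdxList original output).count j
      = if j < original.length ∧ pvFO original j
        then PySem.List.count output (original.getD j "") else 0 := by
  rw [pvIdxList, count_flatMap']
  by_cases hc : j < original.length ∧ pvFO original j
  · obtain ⟨hj, hfo⟩ := hc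
    rw [if_pos ⟨hj, hfo⟩]
    have hgd : original.getD j "" = original[j] := by
      rw [List.getD_eq_getElem?_getD, List.getElem?_eq_getElem hj]; rfl
    rw [sum_map_single _ (((j:Int), original.getD j "")) (PySem.List.count output (original.getD j "")) _ ?_]
    · rw [count_enumerate_pair original j hj, Nat.mul_one]
    · intro p hp
      obtain ⟨k, hk, hpk⟩ := (PySem.List.mem_enumerate_iff _ _ _).mp hp
      subst hpk
      unfold pvBlockI
      simp only [zero_add, Int.toNat_natCast]
      have hgdk : original.getD k "" = original[k] := by
        rw [List.getD_eq_getElem?_getD, List.getElem?_eq_getElem hk]; rfl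
      by_cases hkj : k = j
      · subst hkj
        rw [if_pos (by rw [← hgdk]; exact hfo), if_pos (by rw [hgd]), List.count_replicate]
        simp [PySem.List.count_eq, List.getElem?_eq_getElem hk]
      · have hne : ¬(((k:Int), original[k]) = ((j:Int), original.getD j "")) := by
          simp only [Prod.mk.injEq, Nat.cast_inj, not_and]
          intro h1; exact absurd h1 hkj
        rw [if_neg hne]
        split_ifs with hcond
        · rw [List.count_replicate]
          simp only [beq_iff_eq]
          rw [if_neg hkj]
        · simp
  · rw [if_neg hc]
    apply List.sum_eq_zero
    intro v hv
    obtain ⟨p, hp, hpv⟩ := List.mem_map.mp hv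
    obtain ⟨k, hk, hpk⟩ := (PySem.List.mem_enumerate_iff _ _ _).mp hp
    subst hpk
    rw [← hpv]
    unfold pvBlockI
    simp only [zero_add, Int.toNat_natCast]
    split_ifs with hcond
    · rw [List.count_replicate]
      by_cases hkj : j = k
      · subst hkj
        exact absurd ⟨hk, by unfold pvFO; rw [List.getD_eq_getElem?_getD, List.getElem?_eq_getElem hk]; exact hcond⟩ hc
      · simp only [beq_iff_eq]
        rw [if_neg (fun h => hkj h.symm)]
    · simp

theorem countL (original output : List String) (j : Nat) :
    (((output.filter (fun x => decide (x ∈ original))).map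
        (fun x => (PySem.List.index? original x).getD 0)).count j)
      = if j < original.length ∧ pvFO original j
        then PySem.List.count output (original.getD j "") else 0 := by
  rw [List.count_eq_countP, List.countP_map, List.countP_filter]
  by_cases hc : j < original.length ∧ pvFO original j
  · obtain ⟨hj, hfo⟩ := hc
    rw [if_pos ⟨hj, hfo⟩, PySem.List.count_eq, List.count_eq_countP]
    apply List.countP_congr
    intro x _
    simp only [Function.comp, Bool.and_eq_true, beq_iff_eq, decide_eq_true_iff]
    constructor
    · rintro ⟨hgj, hmem⟩
      obtain ⟨k, hk⟩ := Option.isSome_iff_exists.mp ((PySem.List.index?_isSome_iff original x).mpr hmem)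
      obtain ⟨hklen, hkx, -⟩ := PySem.List.getElem_of_index?_eq_some hk
      rw [hk] at hgj; simp at hgj; subst hgj
      rw [List.getD_eq_getElem?_getD, List.getElem?_eq_getElem hklen]
      simp [hkx]
    · intro hx
      subst hx
      unfold pvFO at hfo
      rw [hfo]
      refine ⟨rfl, ?_⟩
      exact (PySem.List.index?_isSome_iff _ _).mp (by rw [hfo]; rfl)
  · rw [if_neg hc]
    rw [List.countP_eq_zero]
    intro x hx
    simp only [Function.comp, Bool.and_eq_true, beq_iff_eq, decide_eq_true_iff, not_and]
    intro hgj hmem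
    obtain ⟨k, hk⟩ := Option.isSome_iff_exists.mp ((PySem.List.index?_isSome_iff original x).mpr hmem)
    obtain ⟨hklen, hkx, -⟩ := PySem.List.getElem_of_index?_eq_some hk
    rw [hk] at hgj; simp at hgj; subst hgj
    apply hc
    refine ⟨hklen, ?_⟩
    unfold pvFO
    rw [List.getD_eq_getElem?_getD, List.getElem?_eq_getElem hklen]
    simpa [hkx] using hk

theorem pairwise_replicate_le (n : Nat) (a : Nat) :
    (List.replicate n a).Pairwise (· ≤ ·) := by
  induction n with
  | zero => simp
  | succ m ih =>
    rw [List.replicate_succ, List.pairwise_cons]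
    exact ⟨fun y hy => le_of_eq (List.eq_of_mem_replicate hy).symm, ih⟩

theorem pairwiseC (original output : List String) :
    (pvIdxList original output).Pairwise (· ≤ ·) := by
  rw [pvIdxList, List.pairwise_flatMap]
  constructor
  · intro p _
    unfold pvBlockI
    split_ifs
    · exact pairwise_replicate_le _ _
    · simp
  · apply (PySem.List.pairwise_lt_enumerate (xs := original) (s := 0)).imp
    intro p q hpq x hx y hy
    unfold pvBlockI at hx hy
    split_ifs at hx hy
    · rw [List.eq_of_mem_replicate hx, List.eq_of_mem_replicate hy]
      exact Int.toNat_le_toNat (le_of_lt hpq)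
    all_goals simp_all

theorem flatMap_congr' {α β : Type} (l : List α) (f g : α → List β)
    (h : ∀ a ∈ l, f a = g a) : l.flatMap f = l.flatMap g := by
  induction l with
  | nil => rfl
  | cons x xs ih =>
    simp only [List.flatMap_cons]
    rw [h x (by simp), ih (fun a ha => h a (by simp [ha]))]

theorem mapC (original output : List String) :
    (pvIdxList original output).map (fun j => original.getD j "")
      = (PySem.List.enumerate original).flatMap (pvBlockB original output) := by
  rw [pvIdxList, List.map_flatMap]
  apply flatMap_congr'
  intro p hp
  obtain ⟨k, hk, hpk⟩ := (PySem.List.mem_enumerate_iff _ _ _).mp hp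
  subst hpk
  unfold pvBlockI pvBlockB
  simp only [zero_add, Int.toNat_natCast]
  split_ifs
  · rw [List.map_replicate]
    congr 1
    rw [List.getD_eq_getElem?_getD, List.getElem?_eq_getElem hk]; rfl
  · simp

theorem sort_sentences_eq (original output : List String) :
    sort_sentences original output = sort_sentences_alt original output := by
  unfold sort_sentences
  rw [PySem.List.foldl_append_ite, PySem.List.foldl_append_singleton_eq_map]
  simp only [List.nil_append]
  have hperm : (pvIdxList original output).Perm
      ((output.filter (fun x => decide (x ∈ original))).map
        (fun x => (PySem.List.index? original x).getD 0)) := by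
    rw [List.perm_iff_count]
    intro j
    rw [countC, countL]
  rw [PySem.List.sorted_id_eq_of_perm_of_pairwise _ _ hperm (pairwiseC original output)]
  rw [mapC, alt_eq_flatMap]


-- ===== VERDICT (by name: the statement is the Claim_ definition above) =====
theorem sort_sentences_spec : Claim_equal_sort_sentences := by
  intro original output _
  unfold Spec_sort_sentences
  exact sort_sentences_eq original output
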